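-- pv_equiv track=rewrite | github.com/nicydotroy/hotzarina | hotzarina.in/seo_fix_all.py | fix_self_ref_service_card
-- ===== SOURCE A (Python) =====
-- def get_page_slug(filename):
--     """escorts-in-andheri.html → escorts-in-andheri"""
--     return filename.replace('.html', '')
--
-- def fix_self_ref_service_card(content, filename):
--     """Remove self-referencing service card (e.g. 'Book Goa Escorts' on the Goa page)."""
--     slug = get_page_slug(filename)
--     link_marker = f'href="{slug}.html" class="btn-service"'
--
--     if link_marker not in content:
--         return content, 0
--
--     # Find the self-ref link, then walk backwards to find the opening service-card div
--     lines = content.split('\n')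
--     link_line = None
--     for i, line in enumerate(lines):
--         if link_marker in line:
--             link_line = i
--             break
--
--     if link_line is None:
--         return content, 0
--
--     # Walk backwards from the link to find '<div class="service-card">'
--     start = None
--     for i in range(link_line, -1, -1):
--         if '<div class="service-card">' in lines[i]:
--             start = i
--             break
--
--     if start is None:
--         return content, 0
--
--     # Walk forwards from the link to find the matching closing </div>s
--     # After the link: </div> (service-info) then </div> (service-card)
--     end = None
--     div_closes_needed = 2  # close service-info + service-card
--     for i in range(link_line + 1, len(lines)):
--         stripped = lines[i].strip()
--         if stripped == '</div>':
--             div_closes_needed -= 1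
--             if div_closes_needed == 0:
--                 end = i
--                 break
--
--     if end is None:
--         return content, 0
--
--     # Remove lines from start to end (inclusive)
--     new_lines = lines[:start] + lines[end + 1:]
--     return '\n'.join(new_lines), 1
-- ===== SOURCE B (Python) =====
-- def fix_self_ref_service_card(content, filename):
--     """Streaming state machine: emit lines through scan/drop/copy states with a
--     buffered candidate card, instead of locating indices and splicing the list."""
--     slug = filename.replace('.html', '')
--     link_marker = f'href="{slug}.html" class="btn-service"'
--     if link_marker not in content:
--         return content, 0
--     out = []          # lines already committed to the output
--     buf = None        # lines of the current candidate card (None = outside one)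
--     state = 'scan'
--     closes = 0
--     for line in content.split('\n'):
--         if state == 'copy':
--             out.append(line)
--         elif state == 'drop':
--             if line.strip() == '</div>':
--                 closes += 1
--                 if closes == 2:
--                     state = 'copy'
--         else:  # scan
--             if '<div class="service-card">' in line:
--                 if buf is not None:
--                     out.extend(buf)
--                 buf = [line]
--             elif buf is not None:
--                 buf.append(line)
--             else:
--                 out.append(line)
--             if link_marker in line:
--                 if buf is None:
--                     return content, 0
--                 buf = None
--                 state = 'drop'
--     if state != 'copy':
--         return content, 0
--     return '\n'.join(out), 1
-- ===== Notes on version B (the rewrite author's own statement) =====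
-- stated objective: alternative
-- what changed: Replaces A's index-based plan (find the marker line, walk backward for the opening service-card div, count closers forward, then splice lines[:start]+lines[end+1:]) with a single streaming state machine over the lines (scan/drop/copy) that buffers the current candidate card and emits the output directly, never computing line indices or slicing.
import Mathlib
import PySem

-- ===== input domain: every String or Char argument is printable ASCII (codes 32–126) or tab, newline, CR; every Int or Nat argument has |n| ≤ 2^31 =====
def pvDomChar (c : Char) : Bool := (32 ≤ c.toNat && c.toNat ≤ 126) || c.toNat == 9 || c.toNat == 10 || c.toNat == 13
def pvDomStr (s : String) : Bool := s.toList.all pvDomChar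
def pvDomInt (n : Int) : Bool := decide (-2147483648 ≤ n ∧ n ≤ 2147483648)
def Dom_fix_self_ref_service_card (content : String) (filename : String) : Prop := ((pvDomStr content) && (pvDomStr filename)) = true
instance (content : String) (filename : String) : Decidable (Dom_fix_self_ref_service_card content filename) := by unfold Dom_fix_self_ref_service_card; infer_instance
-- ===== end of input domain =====

-- B replaces A's index-based find/walk-back/splice with a streaming scan/drop/copy state
-- machine that buffers the candidate card and emits the output lines directly (alternative
-- decomposition, no speed claim).

-- ===== PORT A =====
-- first loop: enumerate lines, first line containing the marker
def pvAFind (marker : String) : List String → Nat → Option Nat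
  | [], _ => none
  | l :: t, i => if PySem.Str.isIn marker l then some i else pvAFind marker t (i + 1)

-- backward loop: for i in range(link_line, -1, -1), first line containing the opener
def pvABack (lines : List String) (card : String) : Nat → Option Nat
  | 0 => if PySem.Str.isIn card (lines.getD 0 "") then some 0 else none
  | j + 1 => if PySem.Str.isIn card (lines.getD (j + 1) "") then some (j + 1) else pvABack lines card j

-- forward loop: for i in range(link_line+1, len(lines)), count down two stripped '</div>'
def pvAFwd : List String → Nat → Int → Option Nat
  | [], _, _ => none
  | l :: rest, i, needed =>
    if PySem.Str.strip l == "</div>" then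
      if needed - 1 = 0 then some i else pvAFwd rest (i + 1) (needed - 1)
    else pvAFwd rest (i + 1) needed

def fix_self_ref_service_card (content : String) (filename : String) : String × Int :=
  let slug := PySem.Str.replace filename ".html" ""
  let link_marker := "href=\"" ++ slug ++ ".html\" class=\"btn-service\""
  if ¬ PySem.Str.isIn link_marker content then (content, 0)
  else
    -- split? is always `some` for the nonempty separator "\n", so `.getD []` is exact
    let lines := (PySem.Str.split? content "\n").getD []
    match pvAFind link_marker lines 0 with
    | none => (content, 0)
    | some link_line =>
      match pvABack lines "<div class=\"service-card\">" link_line with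
      | none => (content, 0)
      | some start =>
        match pvAFwd (lines.drop (link_line + 1)) (link_line + 1) 2 with
        | none => (content, 0)
        | some e => (PySem.Str.join "\n" (lines.take start ++ lines.drop (e + 1)), 1)

-- ===== PORT B =====
-- 'copy' state: every remaining line is appended to out
def pvBCopy (out : List String) : List String → List String
  | [] => out
  | l :: t => pvBCopy (out ++ [l]) t

-- 'drop' state: skip lines, counting stripped '</div>'; at the second, switch to copy
def pvBDrop (out : List String) (closes : Int) : List String → Option (List String)
  | [] => none
  | l :: t =>
    if PySem.Str.strip l == "</div>" then
      if closes + 1 = 2 then some (pvBCopy out t) else pvBDrop out (closes + 1) t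
    else pvBDrop out closes t

-- the scan-state body: emit the line, or (re)start / extend the buffered candidate card
def pvBStep (card : String) (out : List String) (buf : Option (List String)) (l : String) :
    List String × Option (List String) :=
  if PySem.Str.isIn card l then
    ((match buf with | some b => out ++ b | none => out), some [l])
  else
    match buf with
    | some b => (out, some (b ++ [l]))
    | none => (out ++ [l], none)

-- 'scan' state: at the marker line, discard the buffer and enter 'drop'
-- (none = any of the early/failed returns '(content, 0)')
def pvBScan (marker card : String) (out : List String) (buf : Option (List String)) :
    List String → Option (List String)
  | [] => none
  | l :: t =>
    if PySem.Str.isIn marker l then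
      match (pvBStep card out buf l).2 with
      | none => none
      | some _ => pvBDrop (pvBStep card out buf l).1 0 t
    else pvBScan marker card (pvBStep card out buf l).1 (pvBStep card out buf l).2 t

def fix_self_ref_service_card_alt (content : String) (filename : String) : String × Int :=
  let slug := PySem.Str.replace filename ".html" ""
  let link_marker := "href=\"" ++ slug ++ ".html\" class=\"btn-service\""
  if ¬ PySem.Str.isIn link_marker content then (content, 0)
  else
    let lines := (PySem.Str.split? content "\n").getD []
    match pvBScan link_marker "<div class=\"service-card\">" [] none lines with
    | none => (content, 0)
    | some out => (PySem.Str.join "\n" out, 1)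

-- ===== PRECONDITION & SPEC =====
def Spec_fix_self_ref_service_card (content : String) (filename : String) (out : String × Int) : Prop := out = fix_self_ref_service_card_alt content filename
instance (content : String) (filename : String) (out : String × Int) : Decidable (Spec_fix_self_ref_service_card content filename out) := by unfold Spec_fix_self_ref_service_card; infer_instance

-- ===== CLAIM =====
def Claim_equal_fix_self_ref_service_card : Prop := ∀ (content : String) (filename : String), Dom_fix_self_ref_service_card content filename → Spec_fix_self_ref_service_card content filename (fix_self_ref_service_card content filename)

-- ===== LEMMAS AND PROOFS =====

-- proof-side: last index < i of a line containing `card` (forward characterisation of pvABack)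
def pvLO (lines : List String) (card : String) : Nat → Option Nat
  | 0 => none
  | j + 1 => if PySem.Str.isIn card (lines.getD j "") then some j else pvLO lines card j

lemma pvABack_eq_pvLO (lines : List String) (card : String) :
    ∀ j, pvABack lines card j = pvLO lines card (j + 1) := by
  intro j; induction j with
  | zero => simp [pvABack, pvLO]
  | succ j ih => simp [pvABack, pvLO, ih]

lemma pvLO_lt (lines : List String) (card : String) :
    ∀ i s, pvLO lines card i = some s → s < i := by
  intro i; induction i with
  | zero => intro s h; simp [pvLO] at h
  | succ i ih =>
    intro s h
    simp only [pvLO] at h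
    split_ifs at h with hc
    · cases h; omega
    · exact Nat.lt_succ_of_lt (ih s h)

lemma pvBCopy_eq (ls : List String) : ∀ out, pvBCopy out ls = out ++ ls := by
  induction ls with
  | nil => intro out; simp [pvBCopy]
  | cons l t ih => intro out; simp [pvBCopy, ih]

lemma pvAFwd_ge : ∀ (ls : List String) (i : Nat) (n : Int) (e : Nat),
    pvAFwd ls i n = some e → i ≤ e := by
  intro ls
  induction ls with
  | nil => intro i n e h; simp [pvAFwd] at h
  | cons l t ih =>
    intro i n e h
    simp only [pvAFwd] at h
    split_ifs at h with h1 h2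
    · cases h; omega
    · exact Nat.le_of_succ_le (ih (i + 1) (n - 1) e h)
    · exact Nat.le_of_succ_le (ih (i + 1) n e h)

-- A's countdown forward loop = B's drop state (with absolute-index bookkeeping)
lemma drop_fwd : ∀ (ls : List String) (i : Nat) (out : List String),
    pvBDrop out 0 ls = (pvAFwd ls i 2).map (fun e => out ++ ls.drop (e + 1 - i))
  ∧ pvBDrop out 1 ls = (pvAFwd ls i 1).map (fun e => out ++ ls.drop (e + 1 - i)) := by
  intro ls
  induction ls with
  | nil => intro i out; simp [pvBDrop, pvAFwd]
  | cons l t ih =>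
    intro i out
    by_cases h : (PySem.Str.strip l == "</div>") = true
    · constructor
      · simp only [pvBDrop, pvAFwd, h, if_true]
        rw [if_neg (by norm_num : ¬(0 : Int) + 1 = 2),
            if_neg (by norm_num : ¬(2 : Int) - 1 = 0)]
        rw [show (0 : Int) + 1 = 1 by norm_num, show (2 : Int) - 1 = 1 by norm_num,
            (ih (i + 1) out).2]
        cases hf : pvAFwd t (i + 1) 1 with
        | none => rfl
        | some e =>
          have he := pvAFwd_ge t (i + 1) 1 e hf
          simp only [Option.map_some]
          congr 1
          rw [show e + 1 - i = (e + 1 - (i + 1)) + 1 by omega, List.drop_succ_cons]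
      · simp only [pvBDrop, pvAFwd, h, if_true]
        rw [if_pos (by norm_num : (1 : Int) + 1 = 2),
            if_pos (by norm_num : (1 : Int) - 1 = 0), pvBCopy_eq]
        simp
    · have h1 := (ih (i + 1) out).1
      have h2 := (ih (i + 1) out).2
      constructor <;>
      · simp only [pvBDrop, pvAFwd, h, if_false, Bool.false_eq_true]
        rw [(by assumption : pvBDrop out _ t = _)]
        cases hf : pvAFwd t (i + 1) _ with
        | none => rfl
        | some e =>
          have he := pvAFwd_ge t (i + 1) _ e hf
          simp only [Option.map_some]
          congr 1
          rw [show e + 1 - i = (e + 1 - (i + 1)) + 1 by omega, List.drop_succ_cons]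

-- the scan-state invariant: out/buf are determined by the last opener before i
def pvInv (lines : List String) (card : String) (i : Nat) (out : List String)
    (buf : Option (List String)) : Prop :=
  (pvLO lines card i = none ∧ out = lines.take i ∧ buf = none) ∨
  (∃ s, pvLO lines card i = some s ∧ out = lines.take s ∧ buf = some ((lines.take i).drop s))

-- one scan step preserves the invariant
lemma step_inv (lines : List String) (card : String) (i : Nat) (out : List String)
    (buf : Option (List String)) (l : String) (hli : lines[i]? = some l)
    (hinv : pvInv lines card i out buf) :
    pvInv lines card (i + 1) (pvBStep card out buf l).1 (pvBStep card out buf l).2 := by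
  have hilen : i < lines.length := (List.getElem?_eq_some_iff.mp hli).1
  have hgd : lines.getD i "" = l := by simp [List.getD_eq_getElem?_getD, hli]
  have htake : lines.take (i + 1) = lines.take i ++ [l] := by
    rw [List.take_add_one, hli]; rfl
  have htlen : (lines.take i).length = i := by simp [List.length_take]; omega
  have hlo : pvLO lines card (i + 1) =
      if PySem.Str.isIn card l then some i else pvLO lines card i := by
    simp only [pvLO, hgd]
  by_cases hc : PySem.Str.isIn card l = true
  · right
    refine ⟨i, by rw [hlo, if_pos hc], ?_, ?_⟩
    · rcases hinv with ⟨_, ho, hb⟩ | ⟨s, hs, ho, hb⟩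
      · simp only [pvBStep, hc, if_true, hb, ho]
      · have hsi := pvLO_lt lines card i s hs
        simp only [pvBStep, hc, if_true, hb, ho]
        rw [show lines.take s = (lines.take i).take s by
              rw [List.take_take]; congr 1; omega,
            List.take_append_drop]
    · simp only [pvBStep, hc, if_true]
      rw [htake, List.drop_append_of_le_length (by omega), List.drop_of_length_le (by omega)]
      rfl
  · rcases hinv with ⟨hlon, ho, hb⟩ | ⟨s, hs, ho, hb⟩
    · left
      refine ⟨by rw [hlo, if_neg hc, hlon], ?_, ?_⟩
      · simp only [pvBStep, hc, if_false, Bool.false_eq_true, hb, ho]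
        exact htake.symm
      · simp only [pvBStep, hc, if_false, Bool.false_eq_true, hb]
    · right
      have hsi := pvLO_lt lines card i s hs
      refine ⟨s, by rw [hlo, if_neg hc, hs], ?_, ?_⟩
      · simp only [pvBStep, hc, if_false, Bool.false_eq_true, hb, ho]
      · simp only [pvBStep, hc, if_false, Bool.false_eq_true, hb, ho]
        rw [htake, List.drop_append_of_le_length (by omega)]

-- B's merged scan = A's find, backward walk and forward count chained together
lemma scan_eq (marker card : String) (lines : List String) :
    ∀ (ls : List String) (i : Nat) (out : List String) (buf : Option (List String)),
      lines.drop i = ls → pvInv lines card i out buf →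
      pvBScan marker card out buf ls =
        (match pvAFind marker ls i with
         | none => none
         | some L =>
           match pvABack lines card L with
           | none => none
           | some s => (pvAFwd (lines.drop (L + 1)) (L + 1) 2).map
               (fun e => lines.take s ++ lines.drop (e + 1))) := by
  intro ls
  induction ls with
  | nil => intro i out buf _ _; simp [pvBScan, pvAFind]
  | cons l t ih =>
    intro i out buf hdrop hinv
    have hli : lines[i]? = some l := by
      have : (lines.drop i)[0]? = some l := by rw [hdrop]; rfl
      simpa [List.getElem?_drop] using this
    have hdrop' : lines.drop (i + 1) = t := by
      have := congrArg List.tail hdrop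
      simpa [List.tail_drop] using this
    have hinv' := step_inv lines card i out buf l hli hinv
    by_cases hm : PySem.Str.isIn marker l = true
    · simp only [pvBScan, pvAFind, hm, if_true]
      rcases hinv' with ⟨hlo, ho, hb⟩ | ⟨s, hs, ho, hb⟩
      · simp only [hb, pvABack_eq_pvLO, hlo]
      · simp only [hb, ho, pvABack_eq_pvLO, hs]
        rw [(drop_fwd t (i + 1) (lines.take s)).1, hdrop']
        cases hf : pvAFwd t (i + 1) 2 with
        | none => rfl
        | some e =>
          have he := pvAFwd_ge t (i + 1) 2 e hf
          simp only [Option.map_some]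
          congr 1
          rw [← hdrop', List.drop_drop, show i + 1 + (e + 1 - (i + 1)) = e + 1 by omega]
    · simp only [pvBScan, pvAFind, hm, if_false, Bool.false_eq_true]
      exact ih (i + 1) _ _ hdrop' hinv'

-- ===== VERDICT =====
theorem fix_self_ref_service_card_spec : Claim_equal_fix_self_ref_service_card := by
  intro content filename _
  unfold Spec_fix_self_ref_service_card
  unfold fix_self_ref_service_card fix_self_ref_service_card_alt
  dsimp only
  split_ifs with hg
  case neg => rfl
  rw [scan_eq ("href=\"" ++ PySem.Str.replace filename ".html" "" ++ ".html\" class=\"btn-service\"")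
      "<div class=\"service-card\">" ((PySem.Str.split? content "\n").getD [])
      ((PySem.Str.split? content "\n").getD []) 0 [] none rfl (Or.inl ⟨rfl, rfl, rfl⟩)]
  cases hfind : pvAFind ("href=\"" ++ PySem.Str.replace filename ".html" "" ++ ".html\" class=\"btn-service\"")
      ((PySem.Str.split? content "\n").getD []) 0 with
  | none => rfl
  | some L =>
    dsimp only
    cases hback : pvABack ((PySem.Str.split? content "\n").getD []) "<div class=\"service-card\">" L with
    | none => rfl
    | some s =>
      dsimp only
      cases hf : pvAFwd (((PySem.Str.split? content "\n").getD []).drop (L + 1)) (L + 1) 2 with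
      | none => rfl
      | some e => rfl
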